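-- pv_equiv track=rewrite | github.com/arunkhattri/HackerRank | Algorithm/mat_rotation.py | concentric_rings
-- ===== SOURCE A (Python) =====
-- def concentric_rings(rows, cols, mat):
--     """
--     Imagine matrix as a concentric rings
--     Parameters
--     ----------
--     matrix: array of rows having cols elements
--     rows: number of rows in matrix
--     cols: number of cols in matrix
--     Returns
--     -------
--     list of concentric rings
--     """
--     # total rings
--     r = min(rows, cols) // 2
--     rings = [[] for _ in range(r)]
--     # breakpoint()
--
--     for ring in range(r):
--         top = (cols - 1) - 2 * ring
--         side = (rows - 1) - 2 * ring
--         for i in range(top):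
--             rings[ring].append(mat[ring][ring + i])
--         for j in range(side):
--             rings[ring].append(mat[ring + j][ring + top])
--         for i in range(top):
--             rings[ring].append(mat[ring + side][ring + top - i])
--         for j in range(side):
--             rings[ring].append(mat[ring + side - j][ring])
--     return rings
-- ===== SOURCE B (Python) =====
-- def concentric_rings(rows, cols, mat):
--     """Recursive peel: walk the current boundary box, then recurse inward."""
--     def peel(t, b, l, r):
--         if t >= b or l >= r:
--             return []
--         ring = ([mat[t][c] for c in range(l, r)]
--                 + [mat[x][r] for x in range(t, b)]
--                 + [mat[b][c] for c in range(r, l, -1)]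
--                 + [mat[x][l] for x in range(b, t, -1)])
--         return [ring] + peel(t + 1, b - 1, l + 1, r - 1)
--     return peel(0, rows - 1, 0, cols - 1)
-- ===== Notes on version B (the rewrite author's own statement) =====
-- stated objective: alternative
-- what changed: Replaces A's preallocated rings table mutated by four index-driven append loops with a recursive peel on the boundary box (top,bottom,left,right) that builds each ring as a concatenation of four comprehensions and recurses inward.
import Mathlib
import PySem

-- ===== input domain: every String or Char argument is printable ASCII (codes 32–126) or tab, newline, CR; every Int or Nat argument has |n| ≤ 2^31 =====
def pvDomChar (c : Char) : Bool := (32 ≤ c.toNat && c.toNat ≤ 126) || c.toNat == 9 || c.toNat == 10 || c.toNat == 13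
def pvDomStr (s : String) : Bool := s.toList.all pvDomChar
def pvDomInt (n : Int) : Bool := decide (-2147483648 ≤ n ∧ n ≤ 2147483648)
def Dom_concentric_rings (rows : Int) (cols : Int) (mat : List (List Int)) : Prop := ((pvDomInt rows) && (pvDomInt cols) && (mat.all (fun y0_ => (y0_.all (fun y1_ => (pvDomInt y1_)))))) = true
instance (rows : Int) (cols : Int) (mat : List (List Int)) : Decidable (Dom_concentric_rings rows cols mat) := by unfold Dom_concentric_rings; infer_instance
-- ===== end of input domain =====

-- B is an alternative decomposition (recursive boundary-box peel) of A's ring extraction; equal cost, no speed claim.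

-- mat[i][j]; exact under Pre_ (all indices A/B use are then in range); default 0 only outside Pre_.
def mget (mat : List (List Int)) (i j : Int) : Int :=
  PySem.List.pyGetD (PySem.List.pyGetD mat i []) j 0

-- ===== PORT A =====
-- rings[ring].append(v) is rings.modify ring.toNat (· ++ [v]); exact since ring ∈ range(r) is ≥ 0.
def concentric_rings (rows : Int) (cols : Int) (mat : List (List Int)) : List (List Int) :=
  let r := PySem.Int.floordiv (min rows cols) 2
  let rings := (PySem.List.pyRange 0 r 1).map (fun _ => ([] : List Int))
  (PySem.List.pyRange 0 r 1).foldl (fun rings ring =>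
    let top := (cols - 1) - 2 * ring
    let side := (rows - 1) - 2 * ring
    let rings := (PySem.List.pyRange 0 top 1).foldl
      (fun rs i => rs.modify ring.toNat (· ++ [mget mat ring (ring + i)])) rings
    let rings := (PySem.List.pyRange 0 side 1).foldl
      (fun rs j => rs.modify ring.toNat (· ++ [mget mat (ring + j) (ring + top)])) rings
    let rings := (PySem.List.pyRange 0 top 1).foldl
      (fun rs i => rs.modify ring.toNat (· ++ [mget mat (ring + side) (ring + top - i)])) rings
    let rings := (PySem.List.pyRange 0 side 1).foldl
      (fun rs j => rs.modify ring.toNat (· ++ [mget mat (ring + side - j) ring])) rings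
    rings) rings

-- ===== PORT B =====
-- one boundary ring of the box (t, b, l, r): the four comprehensions of Source B
def boxRing (mat : List (List Int)) (t b l r : Int) : List Int :=
  (PySem.List.pyRange l r 1).map (fun c => mget mat t c)
    ++ (PySem.List.pyRange t b 1).map (fun x => mget mat x r)
    ++ (PySem.List.pyRange r l (-1)).map (fun c => mget mat b c)
    ++ (PySem.List.pyRange b t (-1)).map (fun x => mget mat x l)

def peelRings (mat : List (List Int)) (t b l r : Int) : List (List Int) :=
  if _h : t < b ∧ l < r then
    boxRing mat t b l r :: peelRings mat (t + 1) (b - 1) (l + 1) (r - 1)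
  else []
termination_by (b - t).toNat
decreasing_by omega

def concentric_rings_alt (rows : Int) (cols : Int) (mat : List (List Int)) : List (List Int) :=
  peelRings mat 0 (rows - 1) 0 (cols - 1)

-- ===== PRECONDITION & SPEC =====
-- Exactly the inputs on which Python A returns: with min(rows, cols) < 2 there are no rings and A
-- returns [] without touching mat; otherwise A reads column cols-1 and column 0 of every row
-- 0..rows-1, so it returns iff mat has at least rows rows and each of those has at least cols
-- entries — on anything else A raises IndexError.
def Pre_concentric_rings (rows : Int) (cols : Int) (mat : List (List Int)) : Prop :=
  min rows cols < 2 ∨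
    (rows ≤ (mat.length : Int) ∧ ∀ row ∈ mat.take rows.toNat, cols ≤ (row.length : Int))
instance (rows : Int) (cols : Int) (mat : List (List Int)) : Decidable (Pre_concentric_rings rows cols mat) := by unfold Pre_concentric_rings; infer_instance

def pvWitness_concentric_rings : Int × Int × List (List Int) := (2, 3, [[1, 2, 3], [4, 5, 6]])

def Spec_concentric_rings (rows : Int) (cols : Int) (mat : List (List Int)) (out : List (List Int)) : Prop := out = concentric_rings_alt rows cols mat
instance (rows : Int) (cols : Int) (mat : List (List Int)) (out : List (List Int)) : Decidable (Spec_concentric_rings rows cols mat out) := by unfold Spec_concentric_rings; infer_instance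

-- ===== CLAIM (what is proved, stated in full; the proofs are below) =====
def Claim_equal_concentric_rings : Prop := ∀ (rows : Int) (cols : Int) (mat : List (List Int)), Dom_concentric_rings rows cols mat → Pre_concentric_rings rows cols mat → Spec_concentric_rings rows cols mat (concentric_rings rows cols mat)

-- ===== LEMMAS AND PROOFS =====

theorem mget_congr (mat : List (List Int)) {i i' j j' : Int} (hi : i = i') (hj : j = j') :
    mget mat i j = mget mat i' j' := by rw [hi, hj]

theorem boxRing_congr (mat : List (List Int)) {t t' b b' l l' r r' : Int}
    (ht : t = t') (hb : b = b') (hl : l = l') (hr : r = r') :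
    boxRing mat t b l r = boxRing mat t' b' l' r' := by rw [ht, hb, hl, hr]

-- A's four segments for ring k, concatenated in order (what the four append-loops build).
def bodyA (rows cols : Int) (mat : List (List Int)) (k : Int) : List Int :=
  (PySem.List.pyRange 0 ((cols - 1) - 2 * k) 1).map (fun i => mget mat k (k + i))
    ++ (PySem.List.pyRange 0 ((rows - 1) - 2 * k) 1).map (fun j => mget mat (k + j) (k + ((cols - 1) - 2 * k)))
    ++ (PySem.List.pyRange 0 ((cols - 1) - 2 * k) 1).map (fun i => mget mat (k + ((rows - 1) - 2 * k)) (k + ((cols - 1) - 2 * k) - i))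
    ++ (PySem.List.pyRange 0 ((rows - 1) - 2 * k) 1).map (fun j => mget mat (k + ((rows - 1) - 2 * k) - j) k)

-- the first m ring slots, fully filled
def slots (body : Int → List Int) (m : Nat) : List (List Int) :=
  (List.range m).map (fun k : Nat => body (k : Int))

theorem slots_length (body : Int → List Int) (m : Nat) : (slots body m).length = m := by
  simp [slots]

theorem slots_succ (body : Int → List Int) (m : Nat) :
    slots body (m + 1) = slots body m ++ [body (m : Int)] := by
  simp [slots, List.range_succ]

-- an append-one-element loop on slot n is a single modify appending the mapped list
theorem foldl_modify_append {β : Type} (f : β → Int) (n : Nat) :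
    ∀ (L : List β) (rs : List (List Int)),
      L.foldl (fun rs i => rs.modify n (· ++ [f i])) rs = rs.modify n (· ++ L.map f) := by
  intro L
  induction L with
  | nil =>
      intro rs
      simp only [List.foldl_nil, List.map_nil]
      have h : (fun x : List Int => x ++ ([] : List Int)) = id := by funext x; simp
      rw [h, List.modify_id]
  | cons a L ih =>
      intro rs
      simp only [List.foldl_cons, List.map_cons]
      rw [ih, List.modify_modify_eq]
      congr 1
      funext x
      simp

theorem modify_append_cons {α : Type} (pre : List α) (y : α) (ys : List α) (f : α → α) :
    (pre ++ y :: ys).modify pre.length f = pre ++ f y :: ys := by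
  induction pre with
  | nil => simp [List.modify]
  | cons a pre ih => simpa [List.modify] using ih

-- the outer loop of A fills the slots left to right
theorem foldA_fill (body : Int → List Int) :
    ∀ (n m : Nat),
      (PySem.List.pyRange (m : Int) ((m : Int) + (n : Int)) 1).foldl
          (fun rs ring => rs.modify ring.toNat (· ++ body ring))
          (slots body m ++ List.replicate n ([] : List Int))
        = slots body (m + n) := by
  intro n
  induction n with
  | zero =>
      intro m
      simp [PySem.List.pyRange_one_eq_nil]
  | succ n ih =>
      intro m
      rw [PySem.List.pyRange_one_cons (by push_cast; omega)]
      simp only [List.foldl_cons]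
      rw [List.replicate_succ]
      rw [show ((m : Int)).toNat = m from by omega]
      have hm := modify_append_cons (slots body m) ([] : List Int)
        (List.replicate n ([] : List Int)) (· ++ body (m : Int))
      rw [slots_length] at hm
      rw [hm, List.nil_append]
      rw [show slots body m ++ body (m : Int) :: List.replicate n ([] : List Int)
            = slots body (m + 1) ++ List.replicate n ([] : List Int) from by
        rw [slots_succ]; simp]
      rw [show ((m : Int)) + 1 = (((m + 1 : Nat)) : Int) from by push_cast; ring]
      rw [show ((m : Nat) : Int) + (((n + 1 : Nat)) : Int)
            = (((m + 1 : Nat)) : Int) + ((n : Nat) : Int) from by push_cast; ring]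
      rw [ih (m + 1)]
      congr 1
      omega

-- A's whole loop body for one ring collapses to a single modify with bodyA
theorem stepA_eq (rows cols : Int) (mat : List (List Int)) (ring : Int) (rs : List (List Int)) :
    ((((PySem.List.pyRange 0 ((cols - 1) - 2 * ring) 1).foldl
        (fun rs i => rs.modify ring.toNat (· ++ [mget mat ring (ring + i)])) rs
      |> (PySem.List.pyRange 0 ((rows - 1) - 2 * ring) 1).foldl
        (fun rs j => rs.modify ring.toNat (· ++ [mget mat (ring + j) (ring + ((cols - 1) - 2 * ring))])))
      |> (PySem.List.pyRange 0 ((cols - 1) - 2 * ring) 1).foldl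
        (fun rs i => rs.modify ring.toNat (· ++ [mget mat (ring + ((rows - 1) - 2 * ring)) (ring + ((cols - 1) - 2 * ring) - i)])))
      |> (PySem.List.pyRange 0 ((rows - 1) - 2 * ring) 1).foldl
        (fun rs j => rs.modify ring.toNat (· ++ [mget mat (ring + ((rows - 1) - 2 * ring) - j) ring])))
    = rs.modify ring.toNat (· ++ bodyA rows cols mat ring) := by
  rw [foldl_modify_append, foldl_modify_append, foldl_modify_append, foldl_modify_append]
  rw [List.modify_modify_eq, List.modify_modify_eq, List.modify_modify_eq]
  congr 1
  funext x
  simp [bodyA, List.append_assoc]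

-- A's result is the map of bodyA over the ring indices
theorem A_eq_map (rows cols : Int) (mat : List (List Int)) :
    concentric_rings rows cols mat
      = slots (bodyA rows cols mat) (PySem.Int.floordiv (min rows cols) 2).toNat := by
  unfold concentric_rings
  set r := PySem.Int.floordiv (min rows cols) 2 with hr
  have hR : PySem.List.pyRange 0 r 1 = List.map (fun k : Nat => (k : Int)) (List.range r.toNat) := by
    rw [PySem.List.pyRange_one]
    rw [show (r - 0).toNat = r.toNat from by omega]
    apply List.map_congr_left
    intro a _
    omega
  have hinit : List.map (fun _ => ([] : List Int)) (PySem.List.pyRange 0 r 1)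
      = List.replicate r.toNat ([] : List Int) := by
    rw [List.eq_replicate_iff]
    constructor
    · simp [hR]
    · intro b hb
      rcases List.mem_map.mp hb with ⟨x, -, e⟩
      exact e.symm
  have hre : PySem.List.pyRange 0 r 1 = PySem.List.pyRange ((0 : Nat) : Int) (((0 : Nat) : Int) + ((r.toNat : Nat) : Int)) 1 := by
    rw [PySem.List.pyRange_one, PySem.List.pyRange_one]
    rw [show (((0 : Nat) : Int) + ((r.toNat : Nat) : Int) - ((0 : Nat) : Int)).toNat = (r - 0).toNat from by omega]
    apply List.map_congr_left
    intro a _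
    push_cast
    ring
  calc (PySem.List.pyRange 0 r 1).foldl _ ((PySem.List.pyRange 0 r 1).map (fun _ => ([] : List Int)))
      = (PySem.List.pyRange ((0 : Nat) : Int) (((0 : Nat) : Int) + ((r.toNat : Nat) : Int)) 1).foldl
          (fun rs ring => rs.modify ring.toNat (· ++ bodyA rows cols mat ring))
          (slots (bodyA rows cols mat) 0 ++ List.replicate r.toNat ([] : List Int)) := by
        rw [hinit, ← hre]
        rw [show slots (bodyA rows cols mat) 0 = [] from rfl, List.nil_append]
        congr 1
        funext rs ring
        exact stepA_eq rows cols mat ring rs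
    _ = slots (bodyA rows cols mat) (0 + r.toNat) := foldA_fill (bodyA rows cols mat) r.toNat 0
    _ = slots (bodyA rows cols mat) r.toNat := by rw [Nat.zero_add]

-- each of A's rings is B's boundary ring of the corresponding box (pointwise, no shape hypotheses)
theorem bodyA_eq_boxRing (rows cols : Int) (mat : List (List Int)) (k : Int) :
    bodyA rows cols mat k = boxRing mat k (rows - 1 - k) k (cols - 1 - k) := by
  unfold bodyA boxRing
  have s1 : (PySem.List.pyRange 0 ((cols - 1) - 2 * k) 1).map (fun i => mget mat k (k + i))
      = (PySem.List.pyRange k (cols - 1 - k) 1).map (fun c => mget mat k c) := by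
    rw [PySem.List.pyRange_one 0, PySem.List.pyRange_one k, List.map_map, List.map_map]
    rw [show (cols - 1 - k - k).toNat = ((cols - 1) - 2 * k - 0).toNat from by omega]
    apply List.map_congr_left
    intro a _
    exact mget_congr mat rfl (by push_cast; ring)
  have s2 : (PySem.List.pyRange 0 ((rows - 1) - 2 * k) 1).map
        (fun j => mget mat (k + j) (k + ((cols - 1) - 2 * k)))
      = (PySem.List.pyRange k (rows - 1 - k) 1).map (fun x => mget mat x (cols - 1 - k)) := by
    rw [PySem.List.pyRange_one 0, PySem.List.pyRange_one k, List.map_map, List.map_map]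
    rw [show (rows - 1 - k - k).toNat = ((rows - 1) - 2 * k - 0).toNat from by omega]
    apply List.map_congr_left
    intro a _
    exact mget_congr mat (by push_cast; ring) (by ring)
  have s3 : (PySem.List.pyRange 0 ((cols - 1) - 2 * k) 1).map
        (fun i => mget mat (k + ((rows - 1) - 2 * k)) (k + ((cols - 1) - 2 * k) - i))
      = (PySem.List.pyRange (cols - 1 - k) k (-1)).map (fun c => mget mat (rows - 1 - k) c) := by
    rw [PySem.List.pyRange_one 0, PySem.List.pyRange_neg_one, List.map_map, List.map_map]
    rw [show (cols - 1 - k - k).toNat = ((cols - 1) - 2 * k - 0).toNat from by omega]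
    apply List.map_congr_left
    intro a _
    exact mget_congr mat (by ring) (by push_cast; ring)
  have s4 : (PySem.List.pyRange 0 ((rows - 1) - 2 * k) 1).map
        (fun j => mget mat (k + ((rows - 1) - 2 * k) - j) k)
      = (PySem.List.pyRange (rows - 1 - k) k (-1)).map (fun x => mget mat x k) := by
    rw [PySem.List.pyRange_one 0, PySem.List.pyRange_neg_one, List.map_map, List.map_map]
    rw [show (rows - 1 - k - k).toNat = ((rows - 1) - 2 * k - 0).toNat from by omega]
    apply List.map_congr_left
    intro a _
    exact mget_congr mat (by push_cast; ring) rfl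
  rw [s1, s2, s3, s4]

-- B's peel enumerates the boxes (k, rows-1-k, k, cols-1-k) for k < min(rows,cols) // 2
theorem peel_eq_map (rows cols : Int) (mat : List (List Int)) :
    ∀ (n : Nat) (k : Int), 0 ≤ k →
      (n : Int) = ((PySem.Int.floordiv (min rows cols) 2).toNat : Int) - k →
      peelRings mat k (rows - 1 - k) k (cols - 1 - k)
        = (List.range n).map (fun j : Nat => boxRing mat (k + (j : Int)) (rows - 1 - (k + (j : Int))) (k + (j : Int)) (cols - 1 - (k + (j : Int)))) := by
  have hdiv : PySem.Int.floordiv (min rows cols) 2 = (min rows cols) / 2 :=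
    PySem.Int.floordiv_eq_ediv_of_pos (by norm_num)
  intro n
  induction n with
  | zero =>
      intro k hk hn
      rw [peelRings, dif_neg]
      · simp
      · rw [hdiv] at hn
        rcases le_total rows cols with h | h
        · rw [min_eq_left h] at hn; omega
        · rw [min_eq_right h] at hn; omega
  | succ n ih =>
      intro k hk hn
      have hguard : k < rows - 1 - k ∧ k < cols - 1 - k := by
        rw [hdiv] at hn
        rcases le_total rows cols with h | h
        · rw [min_eq_left h] at hn; constructor <;> omega
        · rw [min_eq_right h] at hn; constructor <;> omega
      rw [peelRings, dif_pos hguard]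
      have e1 : rows - 1 - k - 1 = rows - 1 - (k + 1) := by ring
      have e2 : cols - 1 - k - 1 = cols - 1 - (k + 1) := by ring
      rw [e1, e2, ih (k + 1) (by omega) (by push_cast at hn ⊢; omega)]
      rw [List.range_succ_eq_map]
      simp only [List.map_cons, List.map_map]
      congr 1
      · exact boxRing_congr mat (by norm_num) (by norm_num) (by norm_num) (by norm_num)
      · apply List.map_congr_left
        intro a _
        simp only [Function.comp_apply]
        exact boxRing_congr mat (by push_cast; ring) (by push_cast; ring)
          (by push_cast; ring) (by push_cast; ring)

-- ===== VERDICT (by name: the statement is the Claim_ definition above) =====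
theorem concentric_rings_spec : Claim_equal_concentric_rings := by
  intro rows cols mat _hdom _hpre
  unfold Spec_concentric_rings
  rw [A_eq_map]
  unfold concentric_rings_alt
  have h0 := peel_eq_map rows cols mat (PySem.Int.floordiv (min rows cols) 2).toNat 0 le_rfl
    (by omega)
  rw [show rows - 1 - 0 = rows - 1 from by ring, show cols - 1 - 0 = cols - 1 from by ring] at h0
  rw [h0]
  unfold slots
  apply List.map_congr_left
  intro a _
  rw [bodyA_eq_boxRing]
  exact boxRing_congr mat (by ring) (by ring) (by ring) (by ring)
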